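-- pv_equiv track=rewrite | github.com/romOlivo/GroebnerBases | model/groebner.py | multiply_poly
-- ===== SOURCE A (Python) =====
-- def multiply_poly(p1, p2):
--     dev = {}
--     for mon1 in p1.keys():
--         for mon2 in p2.keys():
--             mon = tuple([mon1[i] + mon2[i] for i in range(len(mon1))])
--             if mon not in dev:
--                 dev[mon] = 0
--             dev[mon] += p1[mon1] * p2[mon2]
--     return dev
-- ===== SOURCE B (Python) =====
-- def multiply_poly(p1, p2):
--     # Staged passes: (1) flat list of all product terms, (2) ordered key dedup,
--     # (3) dict comprehension summing the matching coefficients per key.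
--     prods = [(tuple(a + b for a, b in zip(m1, m2)), c1 * c2)
--              for m1, c1 in p1.items() for m2, c2 in p2.items()]
--     keys = list(dict.fromkeys(m for m, _ in prods))
--     return {k: sum(c for m, c in prods if m == k) for k in keys}
-- ===== Notes on version B (the rewrite author's own statement) =====
-- stated objective: alternative
-- what changed: B replaces A's nested loop with incremental dict accumulation by three staged passes: build the flat list of all pairwise product terms, deduplicate monomials in first-occurrence order, then build the result in one dict comprehension that sums the matching coefficients per monomial.
import Mathlib
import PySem

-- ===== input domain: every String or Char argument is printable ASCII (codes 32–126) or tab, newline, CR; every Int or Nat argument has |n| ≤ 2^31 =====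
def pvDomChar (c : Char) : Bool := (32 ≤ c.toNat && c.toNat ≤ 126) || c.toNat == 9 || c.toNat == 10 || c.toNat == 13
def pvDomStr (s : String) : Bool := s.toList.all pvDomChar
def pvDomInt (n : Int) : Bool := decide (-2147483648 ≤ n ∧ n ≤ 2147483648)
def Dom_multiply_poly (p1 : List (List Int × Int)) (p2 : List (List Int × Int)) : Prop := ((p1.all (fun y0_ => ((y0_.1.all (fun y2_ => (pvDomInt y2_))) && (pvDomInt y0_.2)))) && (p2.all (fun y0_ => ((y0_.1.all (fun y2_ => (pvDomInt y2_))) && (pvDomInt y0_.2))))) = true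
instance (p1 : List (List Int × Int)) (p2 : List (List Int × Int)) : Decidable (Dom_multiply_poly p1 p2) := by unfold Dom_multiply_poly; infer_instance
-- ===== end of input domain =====

-- B replaces A's nested loop with incremental dict accumulation by three staged passes
-- (flat product-term list, ordered key dedup, per-key summation); objective: alternative (B's per-key scan costs more on large inputs).

-- ===== PORT A =====
-- literal port: dicts are PySem.Dict; the list comprehension indexes mon2 at i < len(mon1)
-- (IndexError when a p1-monomial is longer than a p2-monomial — excluded by Pre_).
def multiply_poly (p1 : List (List Int × Int)) (p2 : List (List Int × Int)) : List (List Int × Int) :=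
  let d1 := PySem.Dict.mk p1
  let d2 := PySem.Dict.mk p2
  let dev : PySem.Dict (List Int) Int :=
    d1.keys.foldl (fun dev mon1 =>
      d2.keys.foldl (fun dev mon2 =>
        let mon := (PySem.List.pyRange 0 (mon1.length : Int) 1).map
          (fun i => PySem.List.pyGetD mon1 i 0 + PySem.List.pyGetD mon2 i 0)
        let dev := if dev.contains mon then dev else dev.insert mon 0
        dev.insert mon (dev.getD mon 0 + d1.getD mon1 0 * d2.getD mon2 0)) dev)
      PySem.Dict.empty
  dev.items

-- ===== PORT B =====
def multiply_poly_alt (p1 : List (List Int × Int)) (p2 : List (List Int × Int)) : List (List Int × Int) :=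
  let prods := p1.flatMap (fun t1 =>
    p2.map (fun t2 => (List.zipWith (· + ·) t1.1 t2.1, t1.2 * t2.2)))
  let keys := PySem.List.dedup (prods.map Prod.fst)
  -- dict comprehension: build the dict over 'keys' in order
  (keys.foldl (fun d k =>
      d.insert k (((prods.filter (fun t => t.1 == k)).map Prod.snd).sum))
    (PySem.Dict.empty : PySem.Dict (List Int) Int)).items

-- ===== PRECONDITION & SPEC =====
-- Pre_ excludes (i) inputs where some p1-monomial is longer than some p2-monomial, on which A
-- raises IndexError, and (ii) association lists with duplicate keys, which do not represent a
-- Python dict (the Python functions only ever receive dicts, whose keys are distinct).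
def Pre_multiply_poly (p1 : List (List Int × Int)) (p2 : List (List Int × Int)) : Prop :=
  (∀ m1 ∈ p1.map Prod.fst, ∀ m2 ∈ p2.map Prod.fst, m1.length ≤ m2.length)
  ∧ (p1.map Prod.fst).Nodup ∧ (p2.map Prod.fst).Nodup
instance (p1 : List (List Int × Int)) (p2 : List (List Int × Int)) : Decidable (Pre_multiply_poly p1 p2) := by unfold Pre_multiply_poly; infer_instance

def pvWitness_multiply_poly : (List (List Int × Int)) × (List (List Int × Int)) :=
  ([([1, 0], 2), ([0, 1], -1)], [([0, 1], 3)])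

def Spec_multiply_poly (p1 : List (List Int × Int)) (p2 : List (List Int × Int)) (out : List (List Int × Int)) : Prop := out = multiply_poly_alt p1 p2
instance (p1 : List (List Int × Int)) (p2 : List (List Int × Int)) (out : List (List Int × Int)) : Decidable (Spec_multiply_poly p1 p2 out) := by unfold Spec_multiply_poly; infer_instance

-- ===== CLAIM (what is proved, stated in full; the proofs are below) =====
def Claim_equal_multiply_poly : Prop := ∀ (p1 : List (List Int × Int)) (p2 : List (List Int × Int)), Dom_multiply_poly p1 p2 → Pre_multiply_poly p1 p2 → Spec_multiply_poly p1 p2 (multiply_poly p1 p2)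

-- ===== LEMMAS AND PROOFS =====

-- A's "ensure key, then +=" equals a single get-add-insert update.
theorem pv_step_eq (dev : PySem.Dict (List Int) Int) (k : List Int) (v : Int) :
    (let d := if dev.contains k then dev else dev.insert k 0
     d.insert k (d.getD k 0 + v)) = dev.insert k (dev.getD k 0 + v) := by
  by_cases h : dev.contains k = true
  · simp [h]
  · simp only [if_neg h]
    rw [PySem.Dict.getD_insert_self, PySem.Dict.insert_insert_self,
        PySem.Dict.getD_of_not_contains _ _ (by simpa using h)]

-- A's index-comprehension monomial sum equals zipWith when mon1 is not longer than mon2.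
theorem pv_mon_eq (m1 m2 : List Int) (h : m1.length ≤ m2.length) :
    (PySem.List.pyRange 0 (m1.length : Int) 1).map
        (fun i => PySem.List.pyGetD m1 i 0 + PySem.List.pyGetD m2 i 0)
      = List.zipWith (· + ·) m1 m2 := by
  apply List.ext_getElem
  · simp [PySem.List.length_pyRange_one, h]
  · intro k h1 h2
    have hk1 : k < m1.length := by
      simpa [PySem.List.length_pyRange_one] using h1
    have hk2 : k < m2.length := lt_of_lt_of_le hk1 h
    simp only [List.getElem_map, PySem.List.getElem_pyRange_one, List.getElem_zipWith]
    rw [show ((0 : Int) + (k : Int)) = (k : Int) by ring]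
    rw [PySem.List.pyGetD_of_nonneg m1 0 (by omega),
        PySem.List.pyGetD_of_nonneg m2 0 (by omega)]
    simp [List.getD, hk1, hk2]

-- value of the accumulate-by-insert fold at a key: initial value plus the matching coefficients
theorem pv_getD_fold (prods : List (List Int × Int)) (d : PySem.Dict (List Int) Int) (k : List Int) :
    (prods.foldl (fun d t => d.insert t.1 (d.getD t.1 0 + t.2)) d).getD k 0
      = d.getD k 0 + ((prods.filter (fun t => t.1 == k)).map Prod.snd).sum := by
  induction prods generalizing d with
  | nil => simp
  | cons t rest ih =>
    simp only [List.foldl_cons, ih, List.filter_cons]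
    by_cases h : t.1 = k
    · subst h; simp [PySem.Dict.getD_insert_self]; ring
    · rw [PySem.Dict.getD_insert_of_ne _ _ _ (Ne.symm h)]
      simp [h]

-- ===== VERDICT (by name: the statement is the Claim_ definition above) =====
theorem multiply_poly_spec : Claim_equal_multiply_poly := by
  intro p1 p2 _hdom hpre
  obtain ⟨hlen, hnd1, hnd2⟩ := hpre
  unfold Spec_multiply_poly multiply_poly multiply_poly_alt
  simp only [PySem.Dict.keys_mk, List.foldl_map]
  set prods := p1.flatMap (fun t1 =>
    p2.map (fun t2 => (List.zipWith (· + ·) t1.1 t2.1, t1.2 * t2.2))) with hp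
  -- A's nested loops are the accumulate fold over the flat product list
  have hA : (p1.foldl (fun dev t1 =>
        p2.foldl (fun dev t2 =>
          let mon := (PySem.List.pyRange 0 ((t1.1).length : Int) 1).map
            (fun i => PySem.List.pyGetD t1.1 i 0 + PySem.List.pyGetD t2.1 i 0)
          let dev' := if dev.contains mon then dev else dev.insert mon 0
          dev'.insert mon (dev'.getD mon 0 +
            (PySem.Dict.mk p1).getD t1.1 0 * (PySem.Dict.mk p2).getD t2.1 0)) dev)
        (PySem.Dict.empty : PySem.Dict (List Int) Int))
      = prods.foldl (fun d t => d.insert t.1 (d.getD t.1 0 + t.2))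
          (PySem.Dict.empty : PySem.Dict (List Int) Int) := by
    rw [hp, List.foldl_flatMap]
    apply PySem.List.foldl_congr_mem
    intro dev t1 ht1
    rw [List.foldl_map]
    apply PySem.List.foldl_congr_mem
    intro dev' t2 ht2
    have hc1 : (PySem.Dict.mk p1).getD t1.1 0 = t1.2 :=
      PySem.Dict.getD_of_mem_items _ (by simpa using ht1) (by simpa [PySem.Dict.keys_mk] using hnd1) 0
    have hc2 : (PySem.Dict.mk p2).getD t2.1 0 = t2.2 :=
      PySem.Dict.getD_of_mem_items _ (by simpa using ht2) (by simpa [PySem.Dict.keys_mk] using hnd2) 0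
    have hlen' : t1.1.length ≤ t2.1.length :=
      hlen t1.1 (List.mem_map_of_mem ht1) t2.1 (List.mem_map_of_mem ht2)
    simp only [hc1, hc2, pv_mon_eq t1.1 t2.1 hlen']
    exact pv_step_eq dev' (List.zipWith (· + ·) t1.1 t2.1) (t1.2 * t2.2)
  rw [hA]
  -- both sides are the same map over the deduplicated product monomials
  set D := prods.foldl (fun d t => d.insert t.1 (d.getD t.1 0 + t.2))
      (PySem.Dict.empty : PySem.Dict (List Int) Int) with hD
  have hnodup : D.keys.Nodup := by
    rw [hD]
    exact PySem.Dict.nodup_keys_foldl_insert_key prods (fun t => t.1)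
      (fun d t => d.getD t.1 0 + t.2) _ (by simp)
  have hkeys : D.keys = PySem.List.dedup (prods.map Prod.fst) := by
    rw [hD, PySem.Dict.keys_foldl_insert_key prods (fun t => t.1)
      (fun d t => d.getD t.1 0 + t.2)]
    rw [PySem.List.dedup_eq_ofList]
    simp [PySem.Set.update, PySem.Set.ofList_eq_foldl, PySem.Dict.keys_empty]
  rw [PySem.Dict.items_eq_map_keys D hnodup 0, hkeys]
  rw [PySem.Dict.items_foldl_insert_fresh _ (fun k => k)
    (fun k => ((prods.filter (fun t => t.1 == k)).map Prod.snd).sum) _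
    (by intro a _; exact PySem.Dict.contains_empty a)
    (by simp)]
  simp only [PySem.Dict.empty, List.nil_append]
  apply List.map_congr_left
  intro k _
  rw [hD, pv_getD_fold, PySem.Dict.getD_empty, zero_add]
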